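-- pv_equiv track=rewrite | github.com/yofn/pyacm | codeforces/math数学/1100/1288B999.py | f
-- ===== SOURCE A (Python) =====
-- def f(l):
--     A,B = l
--     i   = 0
--     mx  = 9
--     while B>=mx:
--         mx = mx*10 + 9
--         i += 1
--     return i*A
-- ===== SOURCE B (Python) =====
-- def f(l):
--     A, B = l
--     if B < 9:
--         return 0
--     return A * (len(str(B + 1)) - 1)
-- ===== Notes on version B (the rewrite author's own statement) =====
-- stated objective: simpler
-- what changed: Replaces A's while-loop that grows 9,99,999,... with a closed-form digit count: the number of all-nines values <= B equals len(str(B+1))-1 for B >= 9 (and 0 otherwise).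
import Mathlib
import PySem

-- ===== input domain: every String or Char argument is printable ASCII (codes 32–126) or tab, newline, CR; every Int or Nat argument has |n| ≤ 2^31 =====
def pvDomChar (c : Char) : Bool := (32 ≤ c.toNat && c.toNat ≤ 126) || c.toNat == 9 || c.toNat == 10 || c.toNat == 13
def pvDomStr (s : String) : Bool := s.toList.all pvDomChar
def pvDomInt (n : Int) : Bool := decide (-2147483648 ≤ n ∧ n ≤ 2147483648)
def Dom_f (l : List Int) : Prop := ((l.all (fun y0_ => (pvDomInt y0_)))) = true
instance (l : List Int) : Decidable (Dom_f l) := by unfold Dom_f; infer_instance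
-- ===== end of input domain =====

-- B replaces A's while-loop over 9, 99, 999, … by the closed-form digit count len(str(B+1))-1 (simpler, no explicit loop).

-- ===== PORT A =====
-- the while loop: state (i, mx); 0 < mx is an invariant (mx starts at 9) needed only for termination
def fLoop (B i mx : Int) (h : 0 < mx) : Int :=
  if B ≥ mx then fLoop B (i + 1) (mx * 10 + 9) (by omega) else i
termination_by (B + 1 - mx).toNat
decreasing_by omega

def f (l : List Int) : Int :=
  match l with
  | [a, b] => fLoop b 0 9 (by norm_num) * a
  | _ => 0

-- ===== PORT B =====
def f_alt (l : List Int) : Int :=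
  -- unpack 'A, B = l' (Pre_f guarantees exactly two elements)
  let a := l.headD 0
  let b := (l.drop 1).headD 0
  if b < 9 then 0 else a * (PySem.Str.len (PySem.Int.toStr (b + 1)) - 1)

-- ===== PRECONDITION & SPEC =====
-- Pre_: A unpacks 'A, B = l', so it raises (ValueError) unless l has exactly two elements.
def Pre_f (l : List Int) : Prop := l.length = 2
instance (l : List Int) : Decidable (Pre_f l) := by unfold Pre_f; infer_instance
def pvWitness_f : List Int := [3, 100]

def Spec_f (l : List Int) (out : Int) : Prop := out = f_alt l
instance (l : List Int) (out : Int) : Decidable (Spec_f l out) := by unfold Spec_f; infer_instance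

-- ===== CLAIM (what is proved, stated in full; the proofs are below) =====
def Claim_equal_f : Prop := ∀ (l : List Int), Dom_f l → Pre_f l → Spec_f l (f l)

-- ===== LEMMAS AND PROOFS =====

-- one loop step / loop exit
theorem fLoop_step (B i mx : Int) (h : 0 < mx) (hge : mx ≤ B) :
    fLoop B i mx h = fLoop B (i + 1) (mx * 10 + 9) (by omega) := by
  rw [fLoop]; simp [hge]

theorem fLoop_stop (B i mx : Int) (h : 0 < mx) (hlt : B < mx) :
    fLoop B i mx h = i := by
  rw [fLoop]; simp [show ¬ B ≥ mx by omega]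

-- length of Nat.toDigits 10 with sufficient fuel is the digit count
theorem toDigitsCore_len_log (f n : Nat) (h : n < f) :
    (Nat.toDigitsCore 10 f n []).length = Nat.log 10 n + 1 := by
  induction f generalizing n with
  | zero => omega
  | succ f ih =>
    rw [Nat.toDigitsCore]
    by_cases h10 : n / 10 = 0
    · have hn : n < 10 := by omega
      simp [h10, Nat.log_eq_zero_iff, hn]
    · have hn : 10 ≤ n := by omega
      simp only [h10, if_false, Nat.toDigitsCore_lens_eq]
      rw [ih (n / 10) (by omega)]
      have hpos := Nat.log_pos (by norm_num : 1 < 10) hn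
      rw [Nat.log_div_base]
      omega

theorem toDigits_len_log (n : Nat) : (Nat.toDigits 10 n).length = Nat.log 10 n + 1 :=
  toDigitsCore_len_log (n + 1) n (Nat.lt_succ_self n)

-- the digit count of b+1 for b in the interval [10^e - 1, 10^(e+1) - 1)
theorem len_toStr_interval (b : Int) (e : Nat) (h1 : 10 ^ e - 1 ≤ b) (h2 : b < 10 ^ (e + 1) - 1) :
    PySem.Str.len (PySem.Int.toStr (b + 1)) = (e : Int) + 1 := by
  have he : (1:Int) ≤ 10 ^ e := one_le_pow₀ (by norm_num)
  have hb0 : ¬ (b + 1 < 0) := by omega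
  rw [PySem.Str.len_eq, PySem.Int.toList_toStr, PySem.Int.toChars]
  have hlog : Nat.log 10 (b + 1).toNat = e := by
    apply Nat.log_eq_of_pow_le_of_lt_pow
    · zify [show (0:Int) ≤ b + 1 by omega]
      rw [Int.toNat_of_nonneg (by omega)]; linarith
    · zify [show (0:Int) ≤ b + 1 by omega]
      rw [Int.toNat_of_nonneg (by omega)]; linarith
  simp [hb0, toDigits_len_log, hlog]

-- ===== VERDICT (by name: the statement is the Claim_ definition above) =====
theorem f_spec : Claim_equal_f := by
  intro l hdom hpre
  rcases l with _ | ⟨a, _ | ⟨b, _ | ⟨c, t⟩⟩⟩ <;> simp [Pre_f] at hpre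
  have hb : -2147483648 ≤ b ∧ b ≤ 2147483648 := by
    simp [Dom_f, pvDomInt] at hdom; exact hdom.2
  obtain ⟨hb1, hb2⟩ := hb
  show f [a, b] = f_alt [a, b]
  simp only [f, f_alt, List.drop, List.headD]
  by_cases h0 : b < 9
  · rw [fLoop_stop _ _ _ _ h0, if_pos h0]; ring
  · rw [Int.not_lt] at h0
    rw [if_neg (by omega)]
    by_cases c1 : b < 99
    · rw [fLoop_step _ _ _ _ (by omega), fLoop_stop _ _ _ _ (by omega),
          len_toStr_interval b 1 (by norm_num; omega) (by norm_num; omega)]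
      ring
    · rw [Int.not_lt] at c1
      by_cases c2 : b < 999
      · rw [fLoop_step _ _ _ _ (by omega), fLoop_step _ _ _ _ (by omega), fLoop_stop _ _ _ _ (by omega),
            len_toStr_interval b 2 (by norm_num; omega) (by norm_num; omega)]
        ring
      · rw [Int.not_lt] at c2
        by_cases c3 : b < 9999
        · rw [fLoop_step _ _ _ _ (by omega), fLoop_step _ _ _ _ (by omega), fLoop_step _ _ _ _ (by omega), fLoop_stop _ _ _ _ (by omega),
              len_toStr_interval b 3 (by norm_num; omega) (by norm_num; omega)]
          ring
        · rw [Int.not_lt] at c3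
          by_cases c4 : b < 99999
          · rw [fLoop_step _ _ _ _ (by omega), fLoop_step _ _ _ _ (by omega), fLoop_step _ _ _ _ (by omega), fLoop_step _ _ _ _ (by omega), fLoop_stop _ _ _ _ (by omega),
                len_toStr_interval b 4 (by norm_num; omega) (by norm_num; omega)]
            ring
          · rw [Int.not_lt] at c4
            by_cases c5 : b < 999999
            · rw [fLoop_step _ _ _ _ (by omega), fLoop_step _ _ _ _ (by omega), fLoop_step _ _ _ _ (by omega), fLoop_step _ _ _ _ (by omega), fLoop_step _ _ _ _ (by omega), fLoop_stop _ _ _ _ (by omega),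
                  len_toStr_interval b 5 (by norm_num; omega) (by norm_num; omega)]
              ring
            · rw [Int.not_lt] at c5
              by_cases c6 : b < 9999999
              · rw [fLoop_step _ _ _ _ (by omega), fLoop_step _ _ _ _ (by omega), fLoop_step _ _ _ _ (by omega), fLoop_step _ _ _ _ (by omega), fLoop_step _ _ _ _ (by omega), fLoop_step _ _ _ _ (by omega), fLoop_stop _ _ _ _ (by omega),
                    len_toStr_interval b 6 (by norm_num; omega) (by norm_num; omega)]
                ring
              · rw [Int.not_lt] at c6
                by_cases c7 : b < 99999999
                · rw [fLoop_step _ _ _ _ (by omega), fLoop_step _ _ _ _ (by omega), fLoop_step _ _ _ _ (by omega), fLoop_step _ _ _ _ (by omega), fLoop_step _ _ _ _ (by omega), fLoop_step _ _ _ _ (by omega), fLoop_step _ _ _ _ (by omega), fLoop_stop _ _ _ _ (by omega),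
                      len_toStr_interval b 7 (by norm_num; omega) (by norm_num; omega)]
                  ring
                · rw [Int.not_lt] at c7
                  by_cases c8 : b < 999999999
                  · rw [fLoop_step _ _ _ _ (by omega), fLoop_step _ _ _ _ (by omega), fLoop_step _ _ _ _ (by omega), fLoop_step _ _ _ _ (by omega), fLoop_step _ _ _ _ (by omega), fLoop_step _ _ _ _ (by omega), fLoop_step _ _ _ _ (by omega), fLoop_step _ _ _ _ (by omega), fLoop_stop _ _ _ _ (by omega),
                        len_toStr_interval b 8 (by norm_num; omega) (by norm_num; omega)]
                    ring
                  · rw [Int.not_lt] at c8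
                    rw [fLoop_step _ _ _ _ (by omega), fLoop_step _ _ _ _ (by omega), fLoop_step _ _ _ _ (by omega), fLoop_step _ _ _ _ (by omega), fLoop_step _ _ _ _ (by omega), fLoop_step _ _ _ _ (by omega), fLoop_step _ _ _ _ (by omega), fLoop_step _ _ _ _ (by omega), fLoop_step _ _ _ _ (by omega), fLoop_stop _ _ _ _ (by omega),
                        len_toStr_interval b 9 (by norm_num; omega) (by norm_num; omega)]
                    ring
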